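-- pv_equiv track=rewrite | github.com/junkurihara/atcoder | python/beginner221/C.py | divide_list_idx
-- ===== SOURCE A (Python) =====
-- from itertools import combinations
--
-- def divide_list_idx(list_len, sep_len):
--   idx_comb = list(combinations(range(list_len), sep_len))
--   divided = []
--   for p in idx_comb:
--     remained = []
--     for c in range(list_len):
--       if not {c}.issubset(set(p)):
--         remained.append(c)
--
--     divided.append( (p, remained) )
--   return divided
-- ===== SOURCE B (Python) =====
-- def divide_list_idx(list_len, sep_len):
--   # Breadth-first subset construction: sweep the indices once, keeping every
--   # partial selection as (count, chain) where chain is a persistent cons-list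
--   # (shared prefixes) of the chosen indices in reverse.  A selection may take
--   # the current index (if it still needs one) or skip it (if enough indices
--   # remain to complete it).  Children are emitted take-first, so finished
--   # selections come out in itertools' lexicographic order.  The complement is
--   # emitted as the gaps between consecutive chosen indices.
--   states = [(0, None)]
--   for i in range(list_len):
--     nxt = []
--     for l, ch in states:
--       if l < sep_len:
--         nxt.append((l + 1, (i, ch)))
--       if sep_len <= l + (list_len - i - 1):
--         nxt.append((l, ch))
--     states = nxt
--   res = []
--   for l, ch in states:
--     if l != sep_len:
--       continue
--     chosen = []
--     while ch is not None:
--       chosen.append(ch[0])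
--       ch = ch[1]
--     chosen.reverse()
--     comp = []
--     prev = 0
--     for q in chosen:
--       comp.extend(range(prev, q))
--       prev = q + 1
--     comp.extend(range(prev, list_len))
--     res.append((tuple(chosen), comp))
--   return res
-- ===== Notes on version B (the rewrite author's own statement) =====
-- stated objective: alternative
-- what changed: Replaces itertools.combinations plus a per-combination set-membership scan over range(list_len) by a single breadth-first sweep over the indices that extends every partial selection (take the index / skip it, with a feasibility prune) as a shared cons-chain, and emits each complement as the gaps between consecutive chosen indices instead of re-scanning the whole range against a set.
import Mathlib
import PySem

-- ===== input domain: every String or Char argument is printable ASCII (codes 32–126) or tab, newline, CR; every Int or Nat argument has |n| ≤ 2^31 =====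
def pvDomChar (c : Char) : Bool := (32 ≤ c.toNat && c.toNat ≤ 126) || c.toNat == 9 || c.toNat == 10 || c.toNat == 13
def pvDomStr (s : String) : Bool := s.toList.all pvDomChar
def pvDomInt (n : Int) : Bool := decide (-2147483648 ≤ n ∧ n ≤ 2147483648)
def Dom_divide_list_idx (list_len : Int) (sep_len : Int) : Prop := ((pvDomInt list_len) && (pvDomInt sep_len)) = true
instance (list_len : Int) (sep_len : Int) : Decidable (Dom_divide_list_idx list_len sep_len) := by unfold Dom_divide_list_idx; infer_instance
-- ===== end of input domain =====

-- B replaces itertools.combinations plus a per-combination membership scan by one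
-- breadth-first sweep over the indices that carries each partial selection (with a
-- shared cons-chain of chosen indices) and emits the complement as index gaps.

-- ===== PORT A =====
-- itertools.combinations(range(list_len), sep_len) ported as the standard
-- lexicographic recursion (exact for sep_len ≥ 0; sep_len < 0 raises ValueError
-- in Python and is excluded by Pre_).
def pyCombinations : List Int → Nat → List (List Int)
  | _,       0     => [[]]
  | [],      _+1   => []
  | x :: xs, k+1   => ((pyCombinations xs k).map (fun p => x :: p)) ++ pyCombinations xs (k+1)

def divide_list_idx (list_len : Int) (sep_len : Int) : List (List Int × List Int) :=
  let idx_comb := pyCombinations (PySem.List.pyRange 0 list_len 1) sep_len.toNat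
  idx_comb.foldl (fun divided p =>
    -- 'not {c}.issubset(set(p))' is exactly 'c not in p'
    let remained := (PySem.List.pyRange 0 list_len 1).foldl
      (fun r c => if !(p.contains c) then r ++ [c] else r) []
    divided ++ [(p, remained)]) []

-- ===== PORT B =====
-- one BFS level: each state (count, chain) takes index i (if it still needs one)
-- and/or skips it (if enough indices remain); chain is the Python cons-chain of
-- chosen indices in reverse, ported as List Int.
def bStep (list_len : Int) (sep_len : Int) (states : List (Int × List Int)) (i : Int) :
    List (Int × List Int) :=
  states.foldl (fun nxt s =>
    let nxt2 := if s.1 < sep_len then nxt ++ [(s.1 + 1, i :: s.2)] else nxt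
    if sep_len ≤ s.1 + (list_len - i - 1) then nxt2 ++ [(s.1, s.2)] else nxt2) []

-- finishing loop body: keep states that chose exactly sep_len indices; the Python
-- while-loop unwinds the cons chain (the identity on List Int) and reverses it,
-- then the complement is emitted as the gaps between consecutive chosen indices.
def bFinish (list_len : Int) (sep_len : Int) (res : List (List Int × List Int))
    (s : Int × List Int) : List (List Int × List Int) :=
  if s.1 ≠ sep_len then res
  else
    let chosen := s.2.reverse
    let pc := chosen.foldl
      (fun (pr : Int × List Int) q => (q + 1, pr.2 ++ PySem.List.pyRange pr.1 q 1))
      ((0 : Int), ([] : List Int))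
    res ++ [(chosen, pc.2 ++ PySem.List.pyRange pc.1 list_len 1)]

def divide_list_idx_alt (list_len : Int) (sep_len : Int) : List (List Int × List Int) :=
  let states := (PySem.List.pyRange 0 list_len 1).foldl (bStep list_len sep_len)
    [((0 : Int), ([] : List Int))]
  states.foldl (bFinish list_len sep_len) []

-- ===== PRECONDITION & SPEC =====
-- Pre_ excludes exactly sep_len < 0, where itertools.combinations raises ValueError.
def Pre_divide_list_idx (list_len : Int) (sep_len : Int) : Prop := 0 ≤ sep_len
instance (list_len : Int) (sep_len : Int) : Decidable (Pre_divide_list_idx list_len sep_len) := by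
  unfold Pre_divide_list_idx; infer_instance

def pvWitness_divide_list_idx : Int × Int := (4, 2)

def Spec_divide_list_idx (list_len : Int) (sep_len : Int) (out : List (List Int × List Int)) : Prop := out = divide_list_idx_alt list_len sep_len
instance (list_len : Int) (sep_len : Int) (out : List (List Int × List Int)) : Decidable (Spec_divide_list_idx list_len sep_len out) := by unfold Spec_divide_list_idx; infer_instance

-- ===== CLAIM (what is proved, stated in full; the proofs are below) =====
def Claim_equal_divide_list_idx : Prop := ∀ (list_len : Int) (sep_len : Int), Dom_divide_list_idx list_len sep_len → Pre_divide_list_idx list_len sep_len → Spec_divide_list_idx list_len sep_len (divide_list_idx list_len sep_len)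

-- ===== LEMMAS AND PROOFS =====

/-- `seqI a m = [a, a+1, …, a+m-1]`, the induction-friendly view of `pyRange`. -/
def seqI : Int → Nat → List Int
  | _, 0     => []
  | a, m + 1 => a :: seqI (a + 1) m

theorem pyRange_eq_seqI (m : Nat) : ∀ (a : Int), PySem.List.pyRange a (a + m) 1 = seqI a m := by
  induction m with
  | zero =>
    intro a
    have h : a + ((0 : Nat) : Int) = a := by simp
    rw [h]
    exact PySem.List.pyRange_one_eq_nil (le_refl a)
  | succ m ih =>
    intro a
    rw [PySem.List.pyRange_one_cons (by push_cast; omega)]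
    have h : a + ((m + 1 : Nat) : Int) = (a + 1) + m := by push_cast; ring
    rw [h, ih (a + 1)]
    rfl

theorem length_seqI (m : Nat) : ∀ a, (seqI a m).length = m := by
  induction m with
  | zero => intro a; rfl
  | succ m ih => intro a; simp [seqI, ih]

theorem mem_seqI (m : Nat) : ∀ a x, x ∈ seqI a m → a ≤ x ∧ x < a + m := by
  induction m with
  | zero => intro a x h; simp [seqI] at h
  | succ m ih =>
    intro a x h
    simp only [seqI, List.mem_cons] at h
    rcases h with h | h
    · subst h; constructor <;> push_cast <;> omega
    · have := ih (a + 1) x h; push_cast at this ⊢; omega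

theorem seqI_append (m1 : Nat) : ∀ (m2 : Nat) (a : Int),
    seqI a (m1 + m2) = seqI a m1 ++ seqI (a + m1) m2 := by
  induction m1 with
  | zero => intro m2 a; simp [seqI]
  | succ m1 ih =>
    intro m2 a
    have h : m1 + 1 + m2 = (m1 + m2) + 1 := by omega
    rw [h]
    simp only [seqI, ih m2 (a + 1), List.cons_append]
    congr 2
    push_cast; ring_nf

theorem pyCombinations_eq_nil : ∀ (xs : List Int) (k : Nat), xs.length < k → pyCombinations xs k = [] := by
  intro xs
  induction xs with
  | nil =>
    intro k h
    cases k with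
    | zero => simp at h
    | succ k => rfl
  | cons x xs ih =>
    intro k h
    cases k with
    | zero => simp at h
    | succ k =>
      simp only [List.length_cons] at h
      simp only [pyCombinations, ih k (by omega), ih (k + 1) (by omega), List.map_nil,
        List.nil_append]

theorem sublist_of_mem_pyCombinations : ∀ (xs : List Int) (k : Nat) (p : List Int),
    p ∈ pyCombinations xs k → p.Sublist xs := by
  intro xs
  induction xs with
  | nil =>
    intro k p h
    cases k with
    | zero => simp [pyCombinations] at h; simp [h]
    | succ k => simp [pyCombinations] at h
  | cons x xs ih =>
    intro k p h
    cases k with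
    | zero => simp [pyCombinations] at h; simp [h]
    | succ k =>
      simp only [pyCombinations, List.mem_append, List.mem_map] at h
      rcases h with ⟨q, hq, rfl⟩ | h
      · exact (ih k q hq).cons₂ x
      · exact (ih (k + 1) p h).cons x

/-- decompose a sublist of a contiguous run at its head -/
theorem sublist_seqI_cons (m : Nat) : ∀ (a q : Int) (p' : List Int),
    (q :: p').Sublist (seqI a m) →
    a ≤ q ∧ ∃ m' : Nat, a + (m : Int) = q + 1 + m' ∧ p'.Sublist (seqI (q + 1) m') := by
  induction m with
  | zero => intro a q p' h; simp [seqI] at h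
  | succ m ih =>
    intro a q p' h
    simp only [seqI] at h
    cases h with
    | cons _ h =>
      obtain ⟨h1, m', h2, h3⟩ := ih (a + 1) q p' h
      exact ⟨by omega, m', by push_cast at h2 ⊢; omega, h3⟩
    | cons₂ _ h =>
      exact ⟨le_refl a, m, by push_cast; ring, h⟩

/-- the gaps fold of B, as a named function for the lemmas -/
def gapsFold (p : List Int) (init : Int × List Int) : Int × List Int :=
  p.foldl (fun pr q => (q + 1, pr.2 ++ PySem.List.pyRange pr.1 q 1)) init

theorem gapsFold_cons (q : Int) (p : List Int) (a : Int) (cp : List Int) :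
    gapsFold (q :: p) (a, cp) = gapsFold p (q + 1, cp ++ PySem.List.pyRange a q 1) := rfl

theorem gapsFold_acc : ∀ (p : List Int) (a : Int) (cp : List Int),
    gapsFold p (a, cp) = ((gapsFold p (a, [])).1, cp ++ (gapsFold p (a, [])).2) := by
  intro p
  induction p with
  | nil => intro a cp; simp [gapsFold]
  | cons q p ih =>
    intro a cp
    rw [gapsFold_cons, gapsFold_cons]
    simp only [List.nil_append]
    rw [ih, ih (q + 1) (PySem.List.pyRange a q 1)]
    simp

theorem gaps_eq_filter : ∀ (p : List Int) (a : Int) (m : Nat), p.Sublist (seqI a m) →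
    (gapsFold p (a, [])).2 ++ PySem.List.pyRange (gapsFold p (a, [])).1 (a + m) 1
      = (seqI a m).filter (fun c => !(p.contains c)) := by
  intro p
  induction p with
  | nil =>
    intro a m _
    simp only [gapsFold, List.foldl_nil, List.nil_append]
    rw [pyRange_eq_seqI m a]
    simp
  | cons q p' ih =>
    intro a m h
    obtain ⟨haq, m', hm, hsub⟩ := sublist_seqI_cons m a q p' h
    have hgf : gapsFold (q :: p') (a, []) =
        ((gapsFold p' (q + 1, [])).1,
          PySem.List.pyRange a q 1 ++ (gapsFold p' (q + 1, [])).2) := by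
      rw [gapsFold_cons]
      simp only [List.nil_append]
      rw [gapsFold_acc]
    rw [hgf]
    simp only
    have hr : PySem.List.pyRange a q 1 = seqI a (q - a).toNat := by
      have := pyRange_eq_seqI (q - a).toNat a
      rw [show a + ((q - a).toNat : Int) = q by omega] at this
      exact this
    have hmsplit : m = (q - a).toNat + (m' + 1) := by omega
    have hsplit : seqI a m = seqI a (q - a).toNat ++ q :: seqI (q + 1) m' := by
      rw [hmsplit, seqI_append]
      congr 1
      rw [show a + ((q - a).toNat : Int) = q by omega]
      rfl
    rw [hsplit, List.filter_append]
    have hfilter1 : (seqI a (q - a).toNat).filter (fun c => !((q :: p').contains c))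
        = seqI a (q - a).toNat := by
      apply List.filter_eq_self.mpr
      intro c hc
      have hb := mem_seqI _ _ _ hc
      have hnot : c ∉ (q :: p') := by
        intro hmem
        rcases List.mem_cons.mp hmem with rfl | hmem'
        · omega
        · have := mem_seqI _ _ _ (hsub.subset hmem'); omega
      simp [hnot]
    have hfilter2 : (q :: seqI (q + 1) m').filter (fun c => !((q :: p').contains c))
        = (seqI (q + 1) m').filter (fun c => !(p'.contains c)) := by
      rw [List.filter_cons]
      have hqc : ((q :: p').contains q) = true := by simp
      rw [hqc]
      simp only [Bool.not_true, Bool.false_eq_true, if_false]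
      apply List.filter_congr
      intro c hc
      have hb := mem_seqI _ _ _ hc
      have hne : ¬ (c = q) := by omega
      simp [hne]
    rw [hfilter1, hfilter2, List.append_assoc]
    rw [show a + (m : Int) = (q + 1) + (m' : Int) by omega]
    rw [ih (q + 1) m' hsub, hr]

-- the per-combination output of B, as produced by the finishing loop
def finPair (list_len : Int) (ch : List Int) : List Int × List Int :=
  (ch.reverse,
    (gapsFold ch.reverse (0, [])).2 ++ PySem.List.pyRange (gapsFold ch.reverse (0, [])).1 list_len 1)

def finOne (list_len : Int) (sep_len : Int) (s : Int × List Int) : List (List Int × List Int) :=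
  if s.1 = sep_len then [finPair list_len s.2] else []

theorem flatMap_congr_mem {α β : Type} (S : List α) (f g : α → List β)
    (h : ∀ s ∈ S, f s = g s) : S.flatMap f = S.flatMap g := by
  induction S with
  | nil => rfl
  | cons s S ih =>
    simp only [List.flatMap_cons, h s (by simp)]
    rw [ih (fun t ht => h t (by simp [ht]))]

theorem bStep_eq_flatMap (n k : Int) (i : Int) (S : List (Int × List Int)) :
    bStep n k S i
    = S.flatMap (fun s =>
        (if s.1 < k then [(s.1 + 1, i :: s.2)] else []) ++
        (if k ≤ s.1 + (n - i - 1) then [(s.1, s.2)] else [])) := by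
  unfold bStep
  suffices hgen : ∀ (S : List (Int × List Int)) (acc : List (Int × List Int)),
      S.foldl (fun nxt s =>
        let nxt2 := if s.1 < k then nxt ++ [(s.1 + 1, i :: s.2)] else nxt
        if k ≤ s.1 + (n - i - 1) then nxt2 ++ [(s.1, s.2)] else nxt2) acc
      = acc ++ S.flatMap (fun s =>
          (if s.1 < k then [(s.1 + 1, i :: s.2)] else []) ++
          (if k ≤ s.1 + (n - i - 1) then [(s.1, s.2)] else [])) by
    rw [hgen S []]; rfl
  intro S
  induction S with
  | nil => intro acc; simp
  | cons s S ih =>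
    intro acc
    rw [List.foldl_cons, ih, List.flatMap_cons]
    split_ifs <;> simp

theorem bFinish_push (n k : Int) (acc : List (List Int × List Int)) (s : Int × List Int) :
    bFinish n k acc s = acc ++ finOne n k s := by
  unfold bFinish finOne finPair gapsFold
  by_cases h : s.1 = k
  · simp [h]
  · simp [h]

theorem bFinish_eq_flatMap (n k : Int) : ∀ (S : List (Int × List Int)) (acc : List (List Int × List Int)),
    S.foldl (bFinish n k) acc = acc ++ S.flatMap (finOne n k) := by
  intro S
  induction S with
  | nil => intro acc; simp
  | cons s S ih =>
    intro acc
    rw [List.foldl_cons, bFinish_push, ih, List.flatMap_cons]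
    simp

-- MAIN INVARIANT: running the remaining m BFS levels from states S and then the
-- finishing loop yields, per state, the lexicographic combinations of the
-- remaining indices completing that state.
theorem bfs_main (n k : Int) : ∀ (m : Nat) (i : Int) (S : List (Int × List Int)),
    i + m = n → (∀ s ∈ S, 0 ≤ s.1 ∧ s.1 ≤ k) →
    ((seqI i m).foldl (bStep n k) S).flatMap (finOne n k)
      = S.flatMap (fun s =>
          (pyCombinations (seqI i m) (k - s.1).toNat).map
            (fun p => finPair n (p.reverseAux s.2))) := by
  intro m
  induction m with
  | zero =>
    intro i S _ hS
    simp only [seqI, List.foldl_nil]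
    apply flatMap_congr_mem
    intro s hs
    obtain ⟨h0, hle⟩ := hS s hs
    by_cases hek : s.1 = k
    · have ht0 : (k - s.1).toNat = 0 := by omega
      simp [finOne, pyCombinations, hek]
    · obtain ⟨j, hj⟩ : ∃ j, (k - s.1).toNat = j + 1 := ⟨(k - s.1).toNat - 1, by omega⟩
      simp [finOne, hj, pyCombinations, hek]
  | succ m ih =>
    intro i S hin hS
    have hseq : seqI i (m + 1) = i :: seqI (i + 1) m := rfl
    rw [hseq, List.foldl_cons]
    have hS' : ∀ s ∈ bStep n k S i, 0 ≤ s.1 ∧ s.1 ≤ k := by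
      intro s hs
      rw [bStep_eq_flatMap] at hs
      obtain ⟨t, htS, hts⟩ := List.mem_flatMap.mp hs
      obtain ⟨h0, hle⟩ := hS t htS
      rcases List.mem_append.mp hts with hmem | hmem
      · split_ifs at hmem with hc
        · simp at hmem; subst hmem; exact ⟨by omega, by omega⟩
        · simp at hmem
      · split_ifs at hmem with hc
        · simp at hmem; subst hmem; exact ⟨h0, hle⟩
        · simp at hmem
    have hrec := ih (i + 1) (bStep n k S i) (by push_cast at hin ⊢; omega) hS'
    rw [hrec, bStep_eq_flatMap, List.flatMap_assoc]
    apply flatMap_congr_mem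
    intro s hs
    obtain ⟨h0, hle⟩ := hS s hs
    have hni : n - i - 1 = (m : Int) := by push_cast at hin; omega
    by_cases hek : s.1 = k
    · have ht0 : (k - s.1).toNat = 0 := by omega
      have hlt : ¬ (s.1 < k) := by omega
      have hcond : k ≤ s.1 + (n - i - 1) := by omega
      simp [hlt, hcond, ht0, pyCombinations]
    · have hlt : s.1 < k := lt_of_le_of_ne hle hek
      obtain ⟨j, hj1, hj2⟩ : ∃ j, (k - s.1).toNat = j + 1 ∧ (k - (s.1 + 1)).toNat = j :=
        ⟨(k - s.1).toNat - 1, by omega, by omega⟩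
      rw [hj1]
      simp only [pyCombinations, List.map_append, List.map_map]
      by_cases hcond : k ≤ s.1 + (n - i - 1)
      · simp only [if_pos hlt, if_pos hcond, List.flatMap_append, List.flatMap_cons,
          List.flatMap_nil, List.append_nil, hj2]
        congr 1
        rw [hj1]
      · have hempty : pyCombinations (seqI (i + 1) m) (j + 1) = [] := by
          apply pyCombinations_eq_nil
          rw [length_seqI]
          omega
        simp only [if_pos hlt, if_neg hcond, List.flatMap_cons,
          List.flatMap_nil, List.append_nil, hj2, hempty, List.map_nil]
        apply List.map_congr_left
        intro p _
        rfl

-- A unfolded to a map over the combinations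
theorem a_eq_map (n k : Int) :
    divide_list_idx n k
      = (pyCombinations (PySem.List.pyRange 0 n 1) k.toNat).map
          (fun p => (p, (PySem.List.pyRange 0 n 1).filter (fun c => !(p.contains c)))) := by
  unfold divide_list_idx
  simp only
  rw [PySem.List.foldl_append_singleton_eq_map]
  simp only [List.nil_append]
  apply List.map_congr_left
  intro p _
  rw [PySem.List.foldl_append_if]
  simp

-- B unfolded to a map over the combinations (nonnegative length)
theorem b_eq_map (n k : Int) (hk : 0 ≤ k) (hn : 0 ≤ n) :
    divide_list_idx_alt n k
      = (pyCombinations (seqI 0 n.toNat) k.toNat).map (fun p => finPair n p.reverse) := by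
  unfold divide_list_idx_alt
  simp only
  have hr : PySem.List.pyRange 0 n 1 = seqI 0 n.toNat := by
    have := pyRange_eq_seqI n.toNat 0
    rw [show (0 : Int) + (n.toNat : Int) = n by omega] at this
    exact this
  rw [hr, bFinish_eq_flatMap, List.nil_append]
  rw [bfs_main n k n.toNat 0 [((0 : Int), ([] : List Int))] (by omega)
    (by intro s hs; simp at hs; subst hs; exact ⟨le_refl 0, hk⟩)]
  simp only [List.flatMap_cons, List.flatMap_nil, List.append_nil]
  rw [show k - 0 = k by ring]
  apply List.map_congr_left
  intro p _
  rw [List.reverseAux_eq]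
  simp

-- ===== VERDICT (by name: the statement is the Claim_ definition above) =====
theorem divide_list_idx_spec : Claim_equal_divide_list_idx := by
  intro n k _ hk
  unfold Spec_divide_list_idx
  unfold Pre_divide_list_idx at hk
  rcases lt_or_ge n 0 with hn | hn
  · -- empty range on both sides
    have hr : PySem.List.pyRange 0 n 1 = [] := PySem.List.pyRange_one_eq_nil (by omega)
    rw [a_eq_map]
    unfold divide_list_idx_alt
    simp only
    rw [hr]
    simp only [List.foldl_nil]
    rw [bFinish_eq_flatMap, List.nil_append]
    simp only [List.flatMap_cons, List.flatMap_nil, List.append_nil]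
    by_cases h0 : k = 0
    · subst h0
      simp [pyCombinations, finOne, finPair, gapsFold, hr]
    · obtain ⟨j, hj⟩ : ∃ j, k.toNat = j + 1 := ⟨k.toNat - 1, by omega⟩
      simp only [hj, pyCombinations, List.map_nil, finOne]
      simp [Ne.symm h0]
  · rw [a_eq_map, b_eq_map n k hk hn]
    have hr : PySem.List.pyRange 0 n 1 = seqI 0 n.toNat := by
      have := pyRange_eq_seqI n.toNat 0
      rw [show (0 : Int) + (n.toNat : Int) = n by omega] at this
      exact this
    rw [hr]
    apply List.map_congr_left
    intro p hp
    have hsub := sublist_of_mem_pyCombinations _ _ _ hp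
    unfold finPair
    have hg := gaps_eq_filter p.reverse.reverse 0 n.toNat (by simpa using hsub)
    rw [show (0 : Int) + (n.toNat : Int) = n by omega] at hg
    simp only [List.reverse_reverse] at hg ⊢
    rw [hg]
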